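-- pv_equiv track=rewrite | github.com/flamehaven01/Dir2md | src/dir2md/markdown.py | _escape_fence
-- ===== SOURCE A (Python) =====
-- def _escape_fence(text: str, lang: str = "") -> tuple[str, str]:
--     """
--     Escape markdown code fences to prevent injection.
--     If text contains ```, use ```` (or more) for outer fence.
--     Returns (fence_marker, escaped_text).
--     """
--     # Count consecutive backticks in text
--     max_backticks = 0
--     current_backticks = 0
--     for char in text:
--         if char == '`':
--             current_backticks += 1
--             max_backticks = max(max_backticks, current_backticks)
--         else:
--             current_backticks = 0
--
--     # Use one more backtick than the maximum found
--     fence_length = max(3, max_backticks + 1)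
--     fence = '`' * fence_length
--
--     return fence, text
-- ===== SOURCE B (Python) =====
-- def _escape_fence(text: str, lang: str = "") -> tuple[str, str]:
--     """
--     Escape markdown code fences to prevent injection.
--     Grow the fence until it no longer occurs in the text.
--     Returns (fence_marker, escaped_text).
--     """
--     fence = "```"
--     while fence in text:
--         fence += "`"
--     return fence, text
-- ===== Notes on version B (the rewrite author's own statement) =====
-- stated objective: faster
-- what changed: Replaced the per-character running-counter scan for the longest backtick run by the idiomatic substring-probing loop: start with ``` and grow the fence while it still occurs in the text (`while fence in text`).
import Mathlib
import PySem

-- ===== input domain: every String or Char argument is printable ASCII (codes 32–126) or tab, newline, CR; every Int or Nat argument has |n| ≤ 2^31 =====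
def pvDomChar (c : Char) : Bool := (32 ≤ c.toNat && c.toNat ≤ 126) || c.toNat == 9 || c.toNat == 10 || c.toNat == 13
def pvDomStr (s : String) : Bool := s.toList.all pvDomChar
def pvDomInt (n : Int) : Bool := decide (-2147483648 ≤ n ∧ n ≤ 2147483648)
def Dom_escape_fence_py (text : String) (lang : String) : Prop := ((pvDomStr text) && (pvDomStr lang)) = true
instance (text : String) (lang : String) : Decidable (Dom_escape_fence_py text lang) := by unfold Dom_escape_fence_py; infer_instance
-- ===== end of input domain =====

-- B replaces A's running-counter scan by growing the fence with `while fence in text`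
-- (substring probing); objective: simpler/idiomatic, same return value everywhere.


-- ===== PORT A =====
-- running-counter scan: state = (max_backticks, current_backticks)
def escape_fence_py (text : String) (lang : String) : String × String :=
  let st := text.toList.foldl
    (fun (s : Nat × Nat) char =>
      if char = '`' then (max s.1 (s.2 + 1), s.2 + 1) else (s.1, 0))
    (0, 0)
  let fence_length := max 3 (st.1 + 1)
  (String.ofList (List.replicate fence_length '`'), text)

-- ===== PORT B =====
-- `while fence in text: fence += '`'`; fuel = |text|+1 only makes the loop total
-- (a fence longer than the text never occurs in it, so the fuel is never exhausted).
def growFence (t : List Char) : Nat → List Char → List Char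
  | 0, fence => fence
  | fuel + 1, fence =>
    if PySem.Chars.isIn fence t then growFence t fuel (fence ++ ['`']) else fence

def escape_fence_py_alt (text : String) (lang : String) : String × String :=
  (String.ofList (growFence text.toList (text.toList.length + 1) ['`', '`', '`']), text)

-- ===== PRECONDITION & SPEC =====
def Spec_escape_fence_py (text : String) (lang : String) (out : String × String) : Prop := out = escape_fence_py_alt text lang
instance (text : String) (lang : String) (out : String × String) : Decidable (Spec_escape_fence_py text lang out) := by unfold Spec_escape_fence_py; infer_instance

-- ===== CLAIM (what is proved, stated in full; the proofs are below) =====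
def Claim_equal_escape_fence_py : Prop := ∀ (text : String) (lang : String), Dom_escape_fence_py text lang → Spec_escape_fence_py text lang (escape_fence_py text lang)

-- ===== LEMMAS AND PROOFS =====

-- R c l = the value of A's max-counter after processing l, started with a current run of c
-- backticks already counted into the max.
def R (c : Nat) : List Char → Nat
  | [] => c
  | ch :: t => if ch = '`' then R (c + 1) t else max c (R 0 t)

theorem le_R (l : List Char) : ∀ c, c ≤ R c l := by
  induction l with
  | nil => intro c; simp [R]
  | cons ch t ih =>
    intro c
    by_cases h : ch = '`'
    · simp only [R, if_pos h]
      exact le_trans (Nat.le_succ c) (ih (c + 1))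
    · simp only [R, if_neg h]
      exact le_max_left _ _

theorem R_le (l : List Char) : ∀ c, R c l ≤ c + l.length := by
  induction l with
  | nil => intro c; simp [R]
  | cons ch t ih =>
    intro c
    by_cases h : ch = '`' <;> simp [R, h]
    · have := ih (c + 1); omega
    · have := ih 0; omega

theorem fold_spec (l : List Char) : ∀ (m c : Nat), c ≤ m →
    (l.foldl (fun (s : Nat × Nat) char =>
      if char = '`' then (max s.1 (s.2 + 1), s.2 + 1) else (s.1, 0)) (m, c)).1
    = max m (R c l) := by
  induction l with
  | nil => intro m c h; simp [R]; omega
  | cons ch t ih =>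
    intro m c h
    by_cases hch : ch = '`' <;> simp [List.foldl_cons, hch, R]
    · rw [ih (max m (c + 1)) (c + 1) (le_max_right _ _)]
      have := le_R t (c + 1)
      omega
    · rw [ih m 0 (Nat.zero_le m)]
      omega

theorem repl_infix_repl (n c : Nat) (a : Char) :
    List.replicate n a <:+: List.replicate c a ↔ n ≤ c := by
  constructor
  · intro h
    have := h.length_le
    simpa using this
  · intro h
    refine ⟨[], List.replicate (c - n) a, ?_⟩
    simp only [List.nil_append, ← List.replicate_add]
    congr 1
    omega

-- an all-'`' block inside (replicate c '`') ++ ch :: t with ch ≠ '`' lies in the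
-- replicate part or in t
theorem block_lemma (c n : Nat) (ch : Char) (t : List Char)
    (_hn : 1 ≤ n) (hch : ch ≠ '`') :
    List.replicate n '`' <:+: (List.replicate c '`' ++ ch :: t) ↔
      (n ≤ c ∨ List.replicate n '`' <:+: t) := by
  constructor
  · rintro ⟨s1, s2, he⟩
    by_cases h1 : s1.length + n ≤ c
    · left; omega
    by_cases h2 : c + 1 ≤ s1.length
    · right
      -- drop s1.length of both sides of he
      have hd : (s1 ++ List.replicate n '`' ++ s2).drop s1.length
          = List.replicate n '`' ++ s2 := by
        rw [List.append_assoc, List.drop_left]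
      have hd2 : (List.replicate c '`' ++ ch :: t).drop s1.length
          = t.drop (s1.length - c - 1) := by
        rw [List.drop_append]
        have hc : (List.replicate c '`').drop s1.length = [] := by
          apply List.drop_eq_nil_of_le; simp; omega
        rw [hc, List.nil_append, List.length_replicate]
        have : s1.length - c = (s1.length - c - 1) + 1 := by omega
        rw [this, List.drop_succ_cons]
        simp
      have : List.replicate n '`' ++ s2 = t.drop (s1.length - c - 1) := by
        rw [← hd, he, hd2]
      have hpre : List.replicate n '`' <+: t.drop (s1.length - c - 1) := ⟨s2, this⟩
      exact hpre.isInfix.trans (List.drop_suffix _ _).isInfix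
    · -- index c falls inside the block: contradiction
      exfalso
      have hlen : (List.replicate c '`' ++ ch :: t).length = c + 1 + t.length := by
        simp; omega
      have hcl : c < (List.replicate c '`' ++ ch :: t).length := by omega
      have hrhs : (List.replicate c '`' ++ ch :: t)[c]'hcl = ch := by
        rw [List.getElem_append_right (by simp)]
        simp
      have hcl2 : c < (s1 ++ List.replicate n '`' ++ s2).length := by
        rw [he]; exact hcl
      have hlhs : (s1 ++ List.replicate n '`' ++ s2)[c]'hcl2 = '`' := by
        have hlt : c < (s1 ++ List.replicate n '`').length := by simp; omega
        rw [List.getElem_append_left hlt]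
        rw [List.getElem_append_right (by omega)]
        simp
      have heq : (s1 ++ List.replicate n '`' ++ s2)[c]'hcl2
          = (List.replicate c '`' ++ ch :: t)[c]'hcl := by
        simp only [he]
      rw [hlhs, hrhs] at heq
      exact hch heq.symm
  · rintro (h | h)
    · exact ((repl_infix_repl n c '`').2 h).trans (List.prefix_append _ _).isInfix
    · exact h.trans ((List.suffix_cons ch t).trans (List.suffix_append _ _)).isInfix

-- A run of n ≥ 1 backticks occurs in (replicate c '`') ++ l iff n ≤ R c l.
theorem K_lemma (l : List Char) : ∀ (c n : Nat), 1 ≤ n →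
    (n ≤ R c l ↔ List.replicate n '`' <:+: (List.replicate c '`' ++ l)) := by
  induction l with
  | nil =>
    intro c n hn
    simp only [R, List.append_nil]
    exact (repl_infix_repl n c '`').symm
  | cons ch t ih =>
    intro c n hn
    by_cases hch : ch = '`'
    · subst hch
      have harr : List.replicate c '`' ++ '`' :: t = List.replicate (c + 1) '`' ++ t := by
        rw [List.replicate_succ']
        simp
      rw [harr]
      simpa [R] using ih (c + 1) n hn
    · have hit := ih 0 n hn
      simp only [List.replicate_zero, List.nil_append] at hit
      simp only [R, if_neg hch]
      rw [block_lemma c n ch t hn hch]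
      constructor
      · intro h
        rcases le_max_iff.1 h with h | h
        · exact Or.inl h
        · exact Or.inr (hit.1 h)
      · rintro (h | h)
        · exact le_max_of_le_left h
        · exact le_max_of_le_right (hit.2 h)

theorem growFence_spec (l : List Char) : ∀ (fuel k : Nat), 3 ≤ k →
    k ≤ max 3 (R 0 l + 1) → max 3 (R 0 l + 1) ≤ k + fuel →
    growFence l fuel (List.replicate k '`') = List.replicate (max 3 (R 0 l + 1)) '`' := by
  intro fuel
  induction fuel with
  | zero =>
    intro k h3 hle hge
    have : k = max 3 (R 0 l + 1) := by omega
    simp [growFence, this]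
  | succ fuel ih =>
    intro k h3 hle hge
    by_cases hk : k = max 3 (R 0 l + 1)
    · subst hk
      have hnot : ¬ (max 3 (R 0 l + 1) ≤ R 0 l) := by omega
      have hinf : ¬ (List.replicate (max 3 (R 0 l + 1)) '`' <:+: l) := by
        intro h
        exact hnot ((K_lemma l 0 _ (by omega)).2 (by simpa using h))
      have hfalse : PySem.Chars.isIn (List.replicate (max 3 (R 0 l + 1)) '`') l = false :=
        (PySem.Chars.isIn_eq_false_iff _ _).2 hinf
      simp only [growFence, hfalse, Bool.false_eq_true, if_false]
    · have hkR : k ≤ R 0 l := by omega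
      have hinf : List.replicate k '`' <:+: l := by
        simpa using (K_lemma l 0 k (by omega)).1 hkR
      have htrue : PySem.Chars.isIn (List.replicate k '`') l = true :=
        (PySem.Chars.isIn_iff_infix _ _).2 hinf
      simp only [growFence, htrue, if_true]
      have harr : List.replicate k '`' ++ ['`'] = List.replicate (k + 1) '`' := by
        rw [List.replicate_succ']
      rw [harr]
      exact ih (k + 1) (by omega) (by omega) (by omega)

-- ===== VERDICT (by name: the statement is the Claim_ definition above) =====
theorem escape_fence_py_spec : Claim_equal_escape_fence_py := by
  intro text lang _
  show _ = _
  have hfold := fold_spec text.toList 0 0 (le_refl 0)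
  have hthree : (['`', '`', '`'] : List Char) = List.replicate 3 '`' := by decide
  have hRlen := R_le text.toList 0
  simp only [escape_fence_py, escape_fence_py_alt]
  rw [hfold, Nat.zero_max]
  rw [hthree, growFence_spec text.toList (text.toList.length + 1) 3 (by omega)
    (by omega) (by omega)]
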